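-- pv_equiv track=rewrite | github.com/tutormvetrov/ticket-exam-trainer | ui_flet/components/ticket_card.py | _ticket_number
-- ===== SOURCE A (Python) =====
-- def _ticket_number(ticket_id: str, display_number: int | None = None) -> str:
--     """Build the visible ticket number."""
--     if display_number is not None:
--         return f"#{int(display_number):03d}"
--
--     digits = ""
--     for ch in reversed(ticket_id):
--         if ch.isdigit():
--             digits = ch + digits
--         elif digits:
--             break
--     if digits:
--         return f"#{int(digits):03d}"
--     short = ticket_id[-5:] if len(ticket_id) > 5 else ticket_id
--     return f"#{short}"
-- ===== SOURCE B (Python) =====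
-- def _ticket_number(ticket_id: str, display_number: int | None = None) -> str:
--     """Build the visible ticket number."""
--     if display_number is not None:
--         return "#" + str(int(display_number)).zfill(3)
--
--     # locate the rightmost maximal digit run by index arithmetic
--     i = len(ticket_id)
--     while i > 0 and not ticket_id[i - 1].isdigit():
--         i -= 1
--     j = i
--     while j > 0 and ticket_id[j - 1].isdigit():
--         j -= 1
--     if j < i:
--         return "#" + str(int(ticket_id[j:i])).zfill(3)
--     short = ticket_id[-5:] if len(ticket_id) > 5 else ticket_id
--     return "#" + short
-- ===== Notes on version B (the rewrite author's own statement) =====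
-- stated objective: alternative
-- what changed: Replaces A's reverse character scan that accumulates a digit string with a mid-loop break by pure index arithmetic: two while-loops locate the end and start index of the rightmost digit run, which is then extracted with a single slice; the padded formatting is written with str.zfill instead of an f-string.
import Mathlib
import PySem

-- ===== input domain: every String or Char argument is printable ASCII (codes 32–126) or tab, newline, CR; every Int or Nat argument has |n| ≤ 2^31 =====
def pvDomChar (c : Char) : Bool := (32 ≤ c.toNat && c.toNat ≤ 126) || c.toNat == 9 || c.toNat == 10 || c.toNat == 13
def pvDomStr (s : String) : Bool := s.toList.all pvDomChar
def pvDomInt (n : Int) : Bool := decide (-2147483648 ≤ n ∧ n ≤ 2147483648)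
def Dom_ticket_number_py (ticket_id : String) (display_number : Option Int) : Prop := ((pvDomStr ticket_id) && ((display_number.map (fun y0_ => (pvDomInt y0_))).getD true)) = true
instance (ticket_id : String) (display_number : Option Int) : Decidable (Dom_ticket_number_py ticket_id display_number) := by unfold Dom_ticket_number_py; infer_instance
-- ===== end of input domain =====

-- B replaces A's reverse character scan (accumulating a string, with a mid-loop break)
-- by pure index arithmetic: two while-loops compute the end and start index of the
-- rightmost digit run, which is then taken out with one slice.

-- Both Pythons format "#" ++ a zero-padded int: A writes f"{n:03d}", B writes
-- str(n).zfill(3); for ints these are the same function (str(n) never carries '+'),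
-- so both ports go through PySem.Chars.zfill of str(n) — exact.
def pvFmt03 (n : Int) : List Char :=
  PySem.Chars.zfill (PySem.Int.toChars n) 3

-- ===== PORT A =====
-- the 'for ch in reversed(ticket_id)' loop with its break, digits built by prepending
def pvADigits : List Char → List Char → List Char
  | [], digits => digits
  | c :: rest, digits =>
    if PySem.Chars.isdigit c then pvADigits rest (c :: digits)
    else if digits ≠ [] then digits
    else pvADigits rest digits

def ticket_number_py (ticket_id : String) (display_number : Option Int) : String :=
  match display_number with
  | some n => "#" ++ String.ofList (pvFmt03 n)
  | none =>
    let digits := pvADigits ticket_id.toList.reverse []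
    if digits ≠ [] then
      "#" ++ String.ofList (pvFmt03 ((PySem.Int.ofChars? digits).getD 0))  -- digits nonempty, all-digit ⇒ ofChars? is some
    else
      let short := if ticket_id.toList.length > 5 then
          PySem.List.slice ticket_id.toList (some (-5)) none else ticket_id.toList
      "#" ++ String.ofList short

-- ===== PORT B =====
-- 'while i > 0 and not ticket_id[i-1].isdigit(): i -= 1'; the counter itself is the
-- fuel; the loop guard i > 0 keeps the index i-1 in range, so getD's default is dead.
def pvSkipNonDigits (l : List Char) : Nat → Nat
  | 0 => 0
  | i + 1 => if PySem.Chars.isdigit (l.getD i ' ') then i + 1 else pvSkipNonDigits l i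

-- 'while j > 0 and ticket_id[j-1].isdigit(): j -= 1'
def pvSkipDigits (l : List Char) : Nat → Nat
  | 0 => 0
  | j + 1 => if PySem.Chars.isdigit (l.getD j ' ') then pvSkipDigits l j else j + 1

def ticket_number_py_alt (ticket_id : String) (display_number : Option Int) : String :=
  match display_number with
  | some n => "#" ++ String.ofList (pvFmt03 n)
  | none =>
    let l := ticket_id.toList
    let i := pvSkipNonDigits l l.length
    let j := pvSkipDigits l i
    if j < i then
      "#" ++ String.ofList (pvFmt03
        ((PySem.Int.ofChars? (PySem.List.slice l (some (j : Int)) (some (i : Int)))).getD 0))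
    else
      let short := if l.length > 5 then
          PySem.List.slice l (some (-5)) none else l
      "#" ++ String.ofList short

-- ===== PRECONDITION & SPEC =====
def Spec_ticket_number_py (ticket_id : String) (display_number : Option Int) (out : String) : Prop := out = ticket_number_py_alt ticket_id display_number
instance (ticket_id : String) (display_number : Option Int) (out : String) : Decidable (Spec_ticket_number_py ticket_id display_number out) := by unfold Spec_ticket_number_py; infer_instance

-- ===== CLAIM (what is proved, stated in full; the proofs are below) =====
def Claim_equal_ticket_number_py : Prop := ∀ (ticket_id : String) (display_number : Option Int), Dom_ticket_number_py ticket_id display_number → Spec_ticket_number_py ticket_id display_number (ticket_number_py ticket_id display_number)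

-- ===== LEMMAS AND PROOFS =====

-- once the accumulator is nonempty, A's loop just collects the leading digits of the rest
theorem pvADigits_ne (l acc : List Char) (h : acc ≠ []) :
    pvADigits l acc = (l.takeWhile PySem.Chars.isdigit).reverse ++ acc := by
  induction l generalizing acc with
  | nil => simp [pvADigits]
  | cons c rest ih =>
    by_cases hc : PySem.Chars.isdigit c
    · simp [pvADigits, hc, ih (c :: acc) (by simp)]
    · simp [pvADigits, hc, h]

-- A's result: skip leading (of the reversed list) non-digits, then take digits
theorem pvADigits_nil (l : List Char) :
    pvADigits l [] =
      ((l.dropWhile (fun c => !PySem.Chars.isdigit c)).takeWhile PySem.Chars.isdigit).reverse := by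
  induction l with
  | nil => simp [pvADigits]
  | cons c rest ih =>
    by_cases hc : PySem.Chars.isdigit c
    · simp [pvADigits, hc, pvADigits_ne rest [c] (by simp)]
    · simp [pvADigits, hc, ih]

-- B's first loop, characterised: it strips the trailing non-digit run of l.take i
theorem pvSkipNonDigits_spec (l : List Char) (i : Nat) (h : i ≤ l.length) :
    pvSkipNonDigits l i =
      i - ((l.take i).reverse.takeWhile (fun c => !PySem.Chars.isdigit c)).length := by
  induction i with
  | zero => simp [pvSkipNonDigits]
  | succ i ih =>
    have hi : i < l.length := h
    have htake : l.take (i + 1) = l.take i ++ [l[i]] := by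
      rw [List.take_add_one, List.getElem?_eq_getElem hi, Option.toList_some]
    have hT : ((l.take i).reverse.takeWhile (fun c => !PySem.Chars.isdigit c)).length ≤ i := by
      have h1 := (List.takeWhile_prefix (l := (l.take i).reverse)
        (fun c => !PySem.Chars.isdigit c)).length_le
      simp [List.length_take] at h1
      omega
    simp only [pvSkipNonDigits, List.getD_eq_getElem l ' ' hi, htake, List.reverse_append,
      List.reverse_cons, List.reverse_nil, List.nil_append, List.singleton_append,
      List.takeWhile_cons]
    by_cases hc : PySem.Chars.isdigit l[i]
    · simp [hc]
    · simp only [hc, Bool.not_false, if_true, List.length_cons, Bool.false_eq_true, if_false,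
        ih (Nat.le_of_lt hi)]
      omega

-- B's second loop, characterised: it strips the trailing digit run of l.take j
theorem pvSkipDigits_spec (l : List Char) (j : Nat) (h : j ≤ l.length) :
    pvSkipDigits l j =
      j - ((l.take j).reverse.takeWhile PySem.Chars.isdigit).length := by
  induction j with
  | zero => simp [pvSkipDigits]
  | succ j ih =>
    have hj : j < l.length := h
    have htake : l.take (j + 1) = l.take j ++ [l[j]] := by
      rw [List.take_add_one, List.getElem?_eq_getElem hj, Option.toList_some]
    have hT : ((l.take j).reverse.takeWhile PySem.Chars.isdigit).length ≤ j := by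
      have h1 := (List.takeWhile_prefix (l := (l.take j).reverse) PySem.Chars.isdigit).length_le
      simp [List.length_take] at h1
      omega
    simp only [pvSkipDigits, List.getD_eq_getElem l ' ' hj, htake, List.reverse_append,
      List.reverse_cons, List.reverse_nil, List.nil_append, List.singleton_append,
      List.takeWhile_cons]
    by_cases hc : PySem.Chars.isdigit l[j]
    · simp only [hc, if_true, List.length_cons, ih (Nat.le_of_lt hj)]
      omega
    · simp [hc]

-- the indices B computes, in terms of the reversed list
theorem pvIJ (l : List Char) :
    pvSkipNonDigits l l.length =
      (l.reverse.dropWhile (fun c => !PySem.Chars.isdigit c)).length ∧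
    l.take (pvSkipNonDigits l l.length) =
      (l.reverse.dropWhile (fun c => !PySem.Chars.isdigit c)).reverse := by
  have hspec := pvSkipNonDigits_spec l l.length le_rfl
  rw [List.take_length] at hspec
  have hlen : (l.reverse.takeWhile (fun c => !PySem.Chars.isdigit c)).length +
      (l.reverse.dropWhile (fun c => !PySem.Chars.isdigit c)).length = l.length := by
    have hcongr := congrArg List.length (List.takeWhile_append_dropWhile
      (p := fun c => !PySem.Chars.isdigit c) (l := l.reverse))
    rw [List.length_append, List.length_reverse] at hcongr
    exact hcongr
  refine ⟨by omega, ?_⟩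
  apply List.reverse_injective
  rw [List.reverse_reverse, List.reverse_take, hspec]
  have h2 : l.length - (l.length -
      (l.reverse.takeWhile (fun c => !PySem.Chars.isdigit c)).length) =
      (l.reverse.takeWhile (fun c => !PySem.Chars.isdigit c)).length := by omega
  rw [h2]
  nth_rewrite 2 [← List.takeWhile_append_dropWhile
    (p := fun c => !PySem.Chars.isdigit c) (l := l.reverse)]
  exact List.drop_left

-- B's slice is exactly A's digit run
theorem pvSlice_eq (l : List Char) :
    PySem.List.slice l (some ((pvSkipDigits l (pvSkipNonDigits l l.length) : Nat) : Int))
        (some ((pvSkipNonDigits l l.length : Nat) : Int)) = pvADigits l.reverse [] ∧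
    (pvADigits l.reverse [] ≠ [] ↔
      pvSkipDigits l (pvSkipNonDigits l l.length) < pvSkipNonDigits l l.length) := by
  obtain ⟨hi, htk⟩ := pvIJ l
  have hdl : (l.reverse.dropWhile (fun c => !PySem.Chars.isdigit c)).length ≤ l.length := by
    have := List.length_dropWhile_le (p := fun c => !PySem.Chars.isdigit c) (l := l.reverse)
    simpa using this
  have htl : ((l.reverse.dropWhile (fun c => !PySem.Chars.isdigit c)).takeWhile
      PySem.Chars.isdigit).length ≤ (l.reverse.dropWhile (fun c => !PySem.Chars.isdigit c)).length :=
    (List.takeWhile_prefix _).length_le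
  have hj := pvSkipDigits_spec l (pvSkipNonDigits l l.length) (by rw [hi]; exact hdl)
  rw [htk, List.reverse_reverse] at hj
  have hA : pvADigits l.reverse [] =
      ((l.reverse.dropWhile (fun c => !PySem.Chars.isdigit c)).takeWhile
        PySem.Chars.isdigit).reverse := pvADigits_nil l.reverse
  constructor
  · rw [PySem.List.slice_natCast, ← List.drop_take, htk, List.drop_reverse, hA]
    have heq : (l.reverse.dropWhile (fun c => !PySem.Chars.isdigit c)).length -
        pvSkipDigits l (pvSkipNonDigits l l.length) =
        ((l.reverse.dropWhile (fun c => !PySem.Chars.isdigit c)).takeWhile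
          PySem.Chars.isdigit).length := by omega
    rw [heq, ← List.prefix_iff_eq_take.mp (List.takeWhile_prefix _)]
  · rw [hA, ← List.length_pos_iff, List.length_reverse, hj, hi]
    omega

-- ===== VERDICT (by name: the statement is the Claim_ definition above) =====
theorem ticket_number_py_spec : Claim_equal_ticket_number_py := by
  intro ticket_id display_number _
  unfold Spec_ticket_number_py ticket_number_py ticket_number_py_alt
  cases display_number with
  | some n => rfl
  | none =>
    generalize ticket_id.toList = l
    obtain ⟨h1, h2⟩ := pvSlice_eq l
    by_cases hne : pvADigits l.reverse [] ≠ []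
    · simp [hne, h2.mp hne, h1]
    · have hlt : ¬ pvSkipDigits l (pvSkipNonDigits l l.length) < pvSkipNonDigits l l.length :=
        fun hl => hne (h2.mpr hl)
      simp [hne, hlt]
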